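-- pv_equiv track=rewrite | github.com/julie-berlin/pub-aie7-dynamic-leadgen | backend/app/graphs/supervisors/lead_intelligence_supervisor.py | _identify_qualification_signals
-- ===== SOURCE A (Python) =====
-- from typing import Dict, Any, List, Optional, Tuple
--
-- def _identify_qualification_signals(responses: List[Dict[str, Any]]) -> Dict[str, List[str]]:
--     """Identify various qualification signals from responses."""
--     signals = {
--         "positive": [],
--         "negative": [],
--         "neutral": []
--     }
--
--     for response in responses:
--         answer = response.get('answer', '').lower()
--
--         # Positive signals
--         if any(word in answer for word in ['yes', 'definitely', 'absolutely', 'perfect']):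
--             signals["positive"].append("strong_affirmation")
--
--         if any(phrase in answer for phrase in ['very interested', 'sounds great', 'exactly what']):
--             signals["positive"].append("high_interest")
--
--         # Negative signals
--         if any(word in answer for word in ['no', 'not', 'never', 'can\'t', 'won\'t']):
--             signals["negative"].append("resistance_language")
--
--         if any(phrase in answer for phrase in ['too expensive', 'can\'t afford', 'out of budget']):
--             signals["negative"].append("budget_concerns")
--
--         # Neutral signals
--         if any(word in answer for word in ['maybe', 'perhaps', 'might', 'possibly']):
--             signals["neutral"].append("uncertainty")
--
--     return signals
-- ===== SOURCE B (Python) =====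
-- RULES = [
--     ("positive", "strong_affirmation", ("yes", "definitely", "absolutely", "perfect")),
--     ("positive", "high_interest", ("very interested", "sounds great", "exactly what")),
--     ("negative", "resistance_language", ("no", "not", "never", "can't", "won't")),
--     ("negative", "budget_concerns", ("too expensive", "can't afford", "out of budget")),
--     ("neutral", "uncertainty", ("maybe", "perhaps", "might", "possibly")),
-- ]
--
-- # index all keywords by their first character, built once at module load
-- BY_FIRST = {}
-- for _cat, _label, _kws in RULES:
--     for _k in _kws:
--         BY_FIRST.setdefault(_k[0], []).append(_k)
--
--
-- def _matched_keywords(answer):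
--     """Single left-to-right scan of the answer: at each position, try only the
--     keywords whose first character stands there; collect every keyword found."""
--     found = set()
--     for i, ch in enumerate(answer):
--         for k in BY_FIRST.get(ch, ()):
--             if answer.startswith(k, i):
--                 found.add(k)
--     return found
--
--
-- def _identify_qualification_signals(responses):
--     """Identify various qualification signals from responses."""
--     signals = {"positive": [], "negative": [], "neutral": []}
--     for response in responses:
--         found = _matched_keywords(response.get('answer', '').lower())
--         for cat, label, kws in RULES:
--             if any(k in found for k in kws):
--                 signals[cat].append(label)
--     return signals
-- ===== Notes on version B (the rewrite author's own statement) =====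
-- stated objective: alternative
-- what changed: Replaces A's per-keyword substring tests with a single position-by-position scan of each answer driven by a first-character index of all keywords, collecting the matched keywords into a set that a rule table then consults.
import Mathlib
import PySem

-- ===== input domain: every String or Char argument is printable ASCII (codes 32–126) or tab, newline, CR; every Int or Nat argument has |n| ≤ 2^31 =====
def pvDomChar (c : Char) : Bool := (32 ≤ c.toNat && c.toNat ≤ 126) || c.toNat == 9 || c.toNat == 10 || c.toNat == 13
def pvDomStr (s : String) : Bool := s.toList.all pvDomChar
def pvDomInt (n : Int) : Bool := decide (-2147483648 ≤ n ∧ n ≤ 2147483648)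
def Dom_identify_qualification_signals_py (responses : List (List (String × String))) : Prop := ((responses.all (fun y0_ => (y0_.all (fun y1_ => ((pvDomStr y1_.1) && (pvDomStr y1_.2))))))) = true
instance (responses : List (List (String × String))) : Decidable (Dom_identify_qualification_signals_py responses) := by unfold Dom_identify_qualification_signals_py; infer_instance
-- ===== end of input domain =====

-- ===== PORT A =====
-- loop body of A's 'for response in responses', step for step
def pvStepA (signals : PySem.Dict String (List String)) (response : List (String × String)) :
    PySem.Dict String (List String) :=
  let answer := PySem.Str.lower ((PySem.Dict.mk response).getD "answer" "")
  let signals :=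
    if (["yes", "definitely", "absolutely", "perfect"].any fun w => PySem.Str.isIn w answer) then
      signals.modify "positive" [] (· ++ ["strong_affirmation"]) else signals
  let signals :=
    if (["very interested", "sounds great", "exactly what"].any fun w => PySem.Str.isIn w answer) then
      signals.modify "positive" [] (· ++ ["high_interest"]) else signals
  let signals :=
    if (["no", "not", "never", "can't", "won't"].any fun w => PySem.Str.isIn w answer) then
      signals.modify "negative" [] (· ++ ["resistance_language"]) else signals
  let signals :=
    if (["too expensive", "can't afford", "out of budget"].any fun w => PySem.Str.isIn w answer) then
      signals.modify "negative" [] (· ++ ["budget_concerns"]) else signals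
  let signals :=
    if (["maybe", "perhaps", "might", "possibly"].any fun w => PySem.Str.isIn w answer) then
      signals.modify "neutral" [] (· ++ ["uncertainty"]) else signals
  signals

def identify_qualification_signals_py (responses : List (List (String × String))) :
    List (String × List String) :=
  (responses.foldl pvStepA
    (PySem.Dict.ofList [("positive", ([] : List String)), ("negative", []), ("neutral", [])])).items

-- ===== PORT B =====
-- B scans each answer once, position by position, driven by a first-character index of the keywords.
def pvRulesB : List (String × String × List String) :=
  [("positive", "strong_affirmation", ["yes", "definitely", "absolutely", "perfect"]),
   ("positive", "high_interest", ["very interested", "sounds great", "exactly what"]),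
   ("negative", "resistance_language", ["no", "not", "never", "can't", "won't"]),
   ("negative", "budget_concerns", ["too expensive", "can't afford", "out of budget"]),
   ("neutral", "uncertainty", ["maybe", "perhaps", "might", "possibly"])]

-- BY_FIRST: setdefault(k[0], []).append(k) is getD-then-modify; k[0] ported as headD (every keyword is nonempty)
def pvByFirst : PySem.Dict Char (List String) :=
  pvRulesB.foldl
    (fun d r => r.2.2.foldl (fun d k => d.modify (k.toList.headD ' ') [] (· ++ [k])) d)
    PySem.Dict.empty

-- inner body of the scan: answer.startswith(k, i); i comes from enumerate so 0 ≤ i, drop i.toNat is exact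
def pvScanStep (a : List Char) (found : PySem.Set String) (p : Int × Char) : PySem.Set String :=
  (pvByFirst.getD p.2 []).foldl
    (fun f k => if PySem.Chars.startswith (a.drop p.1.toNat) k.toList then f.add k else f) found

def pvMatched (a : List Char) : PySem.Set String :=
  (PySem.List.enumerate a).foldl (pvScanStep a) PySem.Set.empty

def pvStepB (signals : PySem.Dict String (List String)) (response : List (String × String)) :
    PySem.Dict String (List String) :=
  let found := pvMatched (PySem.Str.lower ((PySem.Dict.mk response).getD "answer" "")).toList
  pvRulesB.foldl
    (fun s r => if r.2.2.any (fun k => found.contains k) then s.modify r.1 [] (· ++ [r.2.1]) else s)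
    signals

def identify_qualification_signals_py_alt (responses : List (List (String × String))) :
    List (String × List String) :=
  (responses.foldl pvStepB
    (PySem.Dict.ofList [("positive", ([] : List String)), ("negative", []), ("neutral", [])])).items

-- ===== PRECONDITION & SPEC =====
def Spec_identify_qualification_signals_py (responses : List (List (String × String))) (out : List (String × List String)) : Prop := out = identify_qualification_signals_py_alt responses
instance (responses : List (List (String × String))) (out : List (String × List String)) : Decidable (Spec_identify_qualification_signals_py responses out) := by unfold Spec_identify_qualification_signals_py; infer_instance

-- ===== CLAIM (what is proved, stated in full; the proofs are below) =====
def Claim_equal_identify_qualification_signals_py : Prop := ∀ (responses : List (List (String × String))), Dom_identify_qualification_signals_py responses → Spec_identify_qualification_signals_py responses (identify_qualification_signals_py responses)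

-- ===== LEMMAS AND PROOFS =====

-- membership after the inner keyword fold of the scan
lemma pv_mem_keyword_fold (ks : List String) (f : PySem.Set String) (c : String → Bool) (x : String) :
    x ∈ ks.foldl (fun f k => if c k then f.add k else f) f ↔ x ∈ f ∨ (x ∈ ks ∧ c x = true) := by
  induction ks generalizing f with
  | nil => simp
  | cons k ks ih =>
      simp only [List.foldl_cons]
      by_cases h : c k = true
      · rw [if_pos h, ih]
        simp only [PySem.Set.mem_add, List.mem_cons]
        constructor
        · rintro (⟨hf | rfl⟩ | hx)
          · exact Or.inl hf
          · exact Or.inr ⟨Or.inl rfl, h⟩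
          · exact Or.inr ⟨Or.inr hx.1, hx.2⟩
        · rintro (hf | ⟨rfl | hx, hcx⟩)
          · exact Or.inl (Or.inl hf)
          · exact Or.inl (Or.inr rfl)
          · exact Or.inr ⟨hx, hcx⟩
      · rw [if_neg h, ih]
        simp only [List.mem_cons]
        constructor
        · rintro (hf | hx)
          · exact Or.inl hf
          · exact Or.inr ⟨Or.inr hx.1, hx.2⟩
        · rintro (hf | ⟨rfl | hx, hcx⟩)
          · exact Or.inl hf
          · exact absurd hcx h
          · exact Or.inr ⟨hx, hcx⟩

-- membership after the position scan over any list of (index, char) pairs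
lemma pv_mem_scan (a : List Char) (ps : List (Int × Char)) (f : PySem.Set String) (x : String) :
    x ∈ ps.foldl (pvScanStep a) f ↔
      x ∈ f ∨ ∃ p ∈ ps, x ∈ pvByFirst.getD p.2 [] ∧
        PySem.Chars.startswith (a.drop p.1.toNat) x.toList = true := by
  induction ps generalizing f with
  | nil => simp
  | cons p ps ih =>
      simp only [List.foldl_cons, ih, pvScanStep, pv_mem_keyword_fold, List.mem_cons]
      constructor
      · rintro ((hf | hx) | ⟨q, hq, hmem, hsw⟩)
        · exact Or.inl hf
        · exact Or.inr ⟨p, Or.inl rfl, hx.1, hx.2⟩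
        · exact Or.inr ⟨q, Or.inr hq, hmem, hsw⟩
      · rintro (hf | ⟨q, rfl | hq, hmem, hsw⟩)
        · exact Or.inl (Or.inl hf)
        · exact Or.inl (Or.inr ⟨hmem, hsw⟩)
        · exact Or.inr ⟨q, hq, hmem, hsw⟩

-- a keyword is collected by the scan iff it occurs as a substring
lemma pv_mem_matched (a : List Char) (k : String) (c : Char) (rest : List Char)
    (hk : k.toList = c :: rest) (hbf : k ∈ pvByFirst.getD c []) :
    k ∈ pvMatched a ↔ PySem.Chars.isIn k.toList a = true := by
  unfold pvMatched
  rw [pv_mem_scan]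
  simp only [PySem.Set.empty, List.not_mem_nil, false_or]
  constructor
  · rintro ⟨p, _, _, hsw⟩
    rw [← PySem.Chars.exists_prefix_drop_iff_isIn]
    exact ⟨p.1.toNat, (PySem.Chars.startswith_iff _ _).mp hsw⟩
  · intro hin
    obtain ⟨j, hpre⟩ := (PySem.Chars.exists_prefix_drop_iff_isIn k.toList a).mpr hin
    have hjlen : j < a.length := by
      by_contra h
      push Not at h
      rw [List.drop_eq_nil_of_le h, hk, List.prefix_nil] at hpre
      exact List.cons_ne_nil _ _ hpre
    have hget : a[j] = c := by
      obtain ⟨t, ht⟩ := hpre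
      have h1 : (List.drop j a)[0]? = some c := by
        rw [show List.drop j a = c :: (rest ++ t) from by rw [← ht, hk]; simp]
        rfl
      rw [List.getElem?_drop, Nat.add_zero, List.getElem?_eq_getElem hjlen] at h1
      exact Option.some_injective _ h1
    refine ⟨((j : Int), a[j]), ?_, ?_, ?_⟩
    · rw [PySem.List.mem_enumerate_iff]
      exact ⟨j, hjlen, by simp⟩
    · simpa [hget] using hbf
    · rw [PySem.Chars.startswith_iff]
      simpa using hpre

-- contains on the match set agrees with Python's 'sub in s' for every rule keyword
lemma pv_contains_iff (a : String) (k : String) (hne : k.toList ≠ [])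
    (hbf : k ∈ pvByFirst.getD (k.toList.headD ' ') []) :
    (pvMatched a.toList).contains k = PySem.Str.isIn k a := by
  obtain ⟨c, rest, hk⟩ := List.exists_cons_of_ne_nil hne
  rw [Bool.eq_iff_iff, PySem.Set.contains_iff,
    pv_mem_matched a.toList k c rest hk (by rw [show c = k.toList.headD ' ' from by rw [hk]; rfl]; exact hbf)]
  simp

-- the two per-response loop bodies agree on every dict state
lemma pv_step_eq (s : PySem.Dict String (List String)) (r : List (String × String)) :
    pvStepB s r = pvStepA s r := by
  unfold pvStepB pvStepA
  simp only [pvRulesB, List.foldl_cons, List.foldl_nil, List.any_cons, List.any_nil, Bool.or_false]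
  rw [pv_contains_iff _ "yes" (by decide) (by decide),
    pv_contains_iff _ "definitely" (by decide) (by decide),
    pv_contains_iff _ "absolutely" (by decide) (by decide),
    pv_contains_iff _ "perfect" (by decide) (by decide),
    pv_contains_iff _ "very interested" (by decide) (by decide),
    pv_contains_iff _ "sounds great" (by decide) (by decide),
    pv_contains_iff _ "exactly what" (by decide) (by decide),
    pv_contains_iff _ "no" (by decide) (by decide),
    pv_contains_iff _ "not" (by decide) (by decide),
    pv_contains_iff _ "never" (by decide) (by decide),
    pv_contains_iff _ "can't" (by decide) (by decide),
    pv_contains_iff _ "won't" (by decide) (by decide),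
    pv_contains_iff _ "too expensive" (by decide) (by decide),
    pv_contains_iff _ "can't afford" (by decide) (by decide),
    pv_contains_iff _ "out of budget" (by decide) (by decide),
    pv_contains_iff _ "maybe" (by decide) (by decide),
    pv_contains_iff _ "perhaps" (by decide) (by decide),
    pv_contains_iff _ "might" (by decide) (by decide),
    pv_contains_iff _ "possibly" (by decide) (by decide)]

-- ===== VERDICT (by name: the statement is the Claim_ definition above) =====
theorem identify_qualification_signals_py_spec : Claim_equal_identify_qualification_signals_py := by
  intro responses _
  show identify_qualification_signals_py responses = identify_qualification_signals_py_alt responses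
  unfold identify_qualification_signals_py identify_qualification_signals_py_alt
  rw [show pvStepB = pvStepA from funext fun s => funext fun r => pv_step_eq s r]
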